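-- pv_equiv track=rewrite | github.com/caioross/365Dias_Python | web/public/codes/26_Outubro_2026.py | agrupa_logs_por_data
-- ===== SOURCE A (Python) =====
-- def agrupa_logs_por_data(logs):
--     """
--     Agrupa logs por data.
--
--     Args:
--         logs (list): Lista de logs, onde cada log é uma string.
--
--     Returns:
--         dict: Um dicionário onde as chaves são datas e os valores são listas de logs para cada data.
--     """
--     logs_agrupados = {}
--     for log in logs:
--         data = log.split()[0]  # Assuming the date is the first element in the log string
--         if data not in logs_agrupados:
--             logs_agrupados[data] = []
--         logs_agrupados[data].append(log)
--     return logs_agrupados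
-- ===== SOURCE B (Python) =====
-- def agrupa_logs_por_data(logs):
--     """Group logs by date prefix: collect the distinct date keys in first-appearance
--     order, then build each group by filtering the whole list per key."""
--     keys = list(dict.fromkeys(log.split()[0] for log in logs))
--     return {k: [log for log in logs if log.split()[0] == k] for k in keys}
-- ===== Notes on version B (the rewrite author's own statement) =====
-- stated objective: alternative
-- what changed: Replaces A's single-pass hash-accumulate (check membership, seed [], append) with a two-phase plan: dedup the date keys in first-appearance order, then build each group by filtering the whole log list per key.
import Mathlib
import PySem

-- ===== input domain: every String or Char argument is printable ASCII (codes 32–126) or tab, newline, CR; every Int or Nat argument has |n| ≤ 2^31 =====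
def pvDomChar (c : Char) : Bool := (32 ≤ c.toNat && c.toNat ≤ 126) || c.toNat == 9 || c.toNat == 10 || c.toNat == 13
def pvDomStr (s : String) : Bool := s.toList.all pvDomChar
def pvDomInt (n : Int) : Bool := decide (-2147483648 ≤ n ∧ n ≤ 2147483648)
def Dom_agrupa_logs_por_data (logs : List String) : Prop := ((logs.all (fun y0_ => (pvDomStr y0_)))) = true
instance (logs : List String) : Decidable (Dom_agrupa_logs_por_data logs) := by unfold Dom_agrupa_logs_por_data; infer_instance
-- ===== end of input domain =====

-- B groups logs by their date prefix via dedup-keys-then-filter-per-key instead of A's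
-- single-pass dict accumulation; same return value (objective: alternative).


-- ===== PORT A =====
-- Python A: for log in logs: data = log.split()[0]; if data not in d: d[data] = []; d[data].append(log)
-- log.split()[0] is ported as pyGet? … 0 with default "" — Pre_ guarantees the index never misses.
def agrupa_logs_por_data (logs : List String) : List (String × List String) :=
  (logs.foldl
    (fun d log =>
      let data := ((PySem.List.pyGet? (PySem.Str.split₀ log) 0).getD "")
      let d := if d.contains data then d else d.insert data []
      d.modify data [] (· ++ [log]))
    PySem.Dict.empty).items

-- ===== PORT B =====
def pvFirstWord (log : String) : String :=
  (PySem.List.pyGet? (PySem.Str.split₀ log) 0).getD ""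

def agrupa_logs_por_data_alt (logs : List String) : List (String × List String) :=
  (PySem.List.dedup (logs.map pvFirstWord)).map
    (fun k => (k, logs.filter (fun log => pvFirstWord log == k)))

-- ===== PRECONDITION & SPEC =====
-- Pre_ excludes exactly the inputs containing an empty/all-whitespace log, on which both
-- Python A and Python B raise IndexError at log.split()[0].
def Pre_agrupa_logs_por_data (logs : List String) : Prop :=
  ∀ log ∈ logs, PySem.Str.split₀ log ≠ []
instance (logs : List String) : Decidable (Pre_agrupa_logs_por_data logs) := by
  unfold Pre_agrupa_logs_por_data; infer_instance

def pvWitness_agrupa_logs_por_data : List String :=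
  ["2024-01-01 boot ok", "2024-01-02 err", "2024-01-01 shutdown"]

def Spec_agrupa_logs_por_data (logs : List String) (out : List (String × List String)) : Prop := out = agrupa_logs_por_data_alt logs
instance (logs : List String) (out : List (String × List String)) : Decidable (Spec_agrupa_logs_por_data logs out) := by unfold Spec_agrupa_logs_por_data; infer_instance

-- ===== CLAIM (what is proved, stated in full; the proofs are below) =====
def Claim_equal_agrupa_logs_por_data : Prop := ∀ (logs : List String), Dom_agrupa_logs_por_data logs → Pre_agrupa_logs_por_data logs → Spec_agrupa_logs_por_data logs (agrupa_logs_por_data logs)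

-- ===== LEMMAS AND PROOFS =====

-- A's loop body (membership test, seed, append) is exactly a dict `modify` at the key.
theorem pvStep_eq (d : PySem.Dict String (List String)) (log : String) :
    (let data := ((PySem.List.pyGet? (PySem.Str.split₀ log) 0).getD "")
     let d' := if d.contains data then d else d.insert data []
     d'.modify data [] (· ++ [log]))
    = d.modify (pvFirstWord log) [] (· ++ [log]) := by
  simp only [pvFirstWord]
  by_cases h : d.contains ((PySem.List.pyGet? (PySem.Str.split₀ log) 0).getD "")
  · simp [h]
  · simp only [Bool.not_eq_true] at h
    simp [h, PySem.Dict.modify, PySem.Dict.getD_insert_self,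
          PySem.Dict.insert_insert_self, PySem.Dict.getD_of_not_contains _ _ h]

-- What A's dict stores under any key c: the logs whose first word is c, in order.
theorem pvGetD_fold (logs : List String) (c : String) :
    ((logs.foldl (fun d log => d.modify (pvFirstWord log) [] (· ++ [log]))
        PySem.Dict.empty).getD c [])
    = logs.filter (fun log => pvFirstWord log == c) := by
  have h := PySem.Dict.getD_foldl_modify_append
      (logs.map (fun log => (pvFirstWord log, log))) PySem.Dict.empty c
  rw [List.foldl_map] at h
  simp only [h, List.filter_map]
  simp [PySem.Dict.getD_of_not_contains, PySem.Dict.contains_empty, Function.comp_def]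

theorem pvMain (logs : List String) :
    agrupa_logs_por_data logs = agrupa_logs_por_data_alt logs := by
  unfold agrupa_logs_por_data agrupa_logs_por_data_alt
  have hbody : (fun (d : PySem.Dict String (List String)) (log : String) =>
      let data := ((PySem.List.pyGet? (PySem.Str.split₀ log) 0).getD "")
      let d := if d.contains data then d else d.insert data []
      d.modify data [] (· ++ [log]))
      = fun d log => d.modify (pvFirstWord log) [] (· ++ [log]) := by
    funext d log; exact pvStep_eq d log
  rw [hbody]
  have hnd : (logs.foldl (fun d log => d.modify (pvFirstWord log) [] (· ++ [log]))
      PySem.Dict.empty).keys.Nodup :=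
    PySem.Dict.nodup_keys_foldl_modify_key logs pvFirstWord []
      (fun _ log => (· ++ [log])) _ PySem.Dict.nodup_keys_empty
  rw [PySem.Dict.items_eq_map_keys _ hnd []]
  rw [PySem.Dict.keys_foldl_modify_key logs pvFirstWord [] (fun _ log => (· ++ [log]))]
  rw [PySem.Dict.keys_empty, PySem.List.dedup_eq_ofList]
  have hupd : PySem.Set.update ([] : PySem.Set String) (logs.map pvFirstWord)
      = PySem.Set.ofList (logs.map pvFirstWord) := rfl
  rw [hupd]
  exact List.map_congr_left (fun k _ => by rw [pvGetD_fold])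

-- ===== VERDICT (by name: the statement is the Claim_ definition above) =====
theorem agrupa_logs_por_data_spec : Claim_equal_agrupa_logs_por_data := by
  intro logs _ _
  unfold Spec_agrupa_logs_por_data
  exact pvMain logs
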